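-- pv_equiv track=rewrite | github.com/samsara0xgg/Jarvis | core/tts_preprocessor.py | _filter_nested
-- ===== SOURCE A (Python) =====
-- def _filter_nested(text: str, pairs: list[tuple[str, str]]) -> str:
--     """Strip content enclosed by any of the given delimiter pairs.
--
--     Handles arbitrary nesting per pair (depth counter per opener char).
--     Mixed-pair nesting (e.g. ``[(]``) is treated by independent depth
--     counters per pair, which is how OLV does it too.
--     """
--     if not isinstance(text, str):
--         raise TypeError("Input must be a string")
--     if not text:
--         return text
--
--     openers = {p[0]: i for i, p in enumerate(pairs)}
--     closers = {p[1]: i for i, p in enumerate(pairs)}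
--     depths = [0] * len(pairs)
--     out: list[str] = []
--     for ch in text:
--         if ch in openers:
--             depths[openers[ch]] += 1
--         elif ch in closers:
--             idx = closers[ch]
--             if depths[idx] > 0:
--                 depths[idx] -= 1
--             else:
--                 # Unmatched closer — keep it (avoid silently eating user text).
--                 if all(d == 0 for d in depths):
--                     out.append(ch)
--         else:
--             if all(d == 0 for d in depths):
--                 out.append(ch)
--     return "".join(out)
-- ===== SOURCE B (Python) =====
-- def _filter_nested(text: str, pairs: list[tuple[str, str]]) -> str:
--     """Strip content enclosed by any of the given delimiter pairs.
--
--     Single classification table (char -> (is_opener, pair index), openers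
--     shadowing closers) plus an incremental count of pairs with nonzero
--     depth, so no per-character rescan of all depths is needed.
--     """
--     if not isinstance(text, str):
--         raise TypeError("Input must be a string")
--     role = {}
--     for i, p in enumerate(pairs):
--         role[p[1]] = (False, i)
--     for i, p in enumerate(pairs):
--         role[p[0]] = (True, i)
--     depths = [0] * len(pairs)
--     active = 0
--     out = []
--     for ch in text:
--         r = role.get(ch)
--         if r is None:
--             if active == 0:
--                 out.append(ch)
--         elif r[0]:
--             i = r[1]
--             if depths[i] == 0:
--                 active += 1
--             depths[i] += 1
--         else:
--             i = r[1]
--             if depths[i] > 0: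
--                 depths[i] -= 1
--                 if depths[i] == 0:
--                     active -= 1
--             elif active == 0:
--                 out.append(ch)
--     return "".join(out)
-- ===== Notes on version B (the rewrite author's own statement) =====
-- stated objective: faster
-- what changed: Replaces the two lookup dicts plus a per-character rescan of all k depth counters (all(d == 0 ...)) with one char->(role,index) classification table and an incrementally maintained count of pairs at nonzero depth, removing the inner O(k) scan.
import Mathlib
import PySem

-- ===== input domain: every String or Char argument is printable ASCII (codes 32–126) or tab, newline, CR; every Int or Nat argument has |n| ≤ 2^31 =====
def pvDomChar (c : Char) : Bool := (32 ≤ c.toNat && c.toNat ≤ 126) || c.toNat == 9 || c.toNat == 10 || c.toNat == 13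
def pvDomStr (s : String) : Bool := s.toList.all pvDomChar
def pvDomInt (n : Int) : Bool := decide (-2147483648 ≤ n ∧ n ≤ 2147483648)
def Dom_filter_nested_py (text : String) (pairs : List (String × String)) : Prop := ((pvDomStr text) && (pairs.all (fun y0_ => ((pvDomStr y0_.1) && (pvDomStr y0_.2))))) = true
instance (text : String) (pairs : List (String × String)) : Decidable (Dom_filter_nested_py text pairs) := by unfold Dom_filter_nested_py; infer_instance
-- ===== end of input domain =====

-- B replaces A's two lookup dicts and per-character rescan of all depth counters by one
-- classification table plus an incrementally maintained count of nonzero depths (faster).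

-- ===== PORT A =====
-- openers = {p[0]: i for i, p in enumerate(pairs)}
def pvOpenersA (pairs : List (String × String)) : PySem.Dict String Int :=
  (PySem.List.enumerate pairs).foldl (fun d ip => d.insert ip.2.1 ip.1) PySem.Dict.empty

-- closers = {p[1]: i for i, p in enumerate(pairs)}
def pvClosersA (pairs : List (String × String)) : PySem.Dict String Int :=
  (PySem.List.enumerate pairs).foldl (fun d ip => d.insert ip.2.2 ip.1) PySem.Dict.empty

-- the body of A's 'for ch in text' loop; state = (depths, out)
def pvStepA (openers closers : PySem.Dict String Int)
    (st : List Int × List Char) (ch : Char) : List Int × List Char :=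
  if openers.contains (String.singleton ch) then
    let i := openers.getD (String.singleton ch) 0
    (PySem.List.pySetD st.1 i (PySem.List.pyGetD st.1 i 0 + 1), st.2)
  else if closers.contains (String.singleton ch) then
    let i := closers.getD (String.singleton ch) 0
    if PySem.List.pyGetD st.1 i 0 > 0 then
      (PySem.List.pySetD st.1 i (PySem.List.pyGetD st.1 i 0 - 1), st.2)
    else if st.1.all (fun d => d == 0) then (st.1, st.2 ++ [ch]) else st
  else if st.1.all (fun d => d == 0) then (st.1, st.2 ++ [ch]) else st

def filter_nested_py (text : String) (pairs : List (String × String)) : String :=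
  if text = "" then text
  else
    let openers := pvOpenersA pairs
    let closers := pvClosersA pairs
    let res := text.toList.foldl (pvStepA openers closers)
      (List.replicate pairs.length (0 : Int), ([] : List Char))
    String.ofList res.2

-- ===== PORT B =====
-- role: closers inserted first, openers second (so an opener shadows a closer, as in Source B)
def pvRoleB (pairs : List (String × String)) : PySem.Dict String (Bool × Int) :=
  (PySem.List.enumerate pairs).foldl (fun d ip => d.insert ip.2.1 (true, ip.1))
    ((PySem.List.enumerate pairs).foldl (fun d ip => d.insert ip.2.2 (false, ip.1)) PySem.Dict.empty)

-- the body of B's loop; state = (depths, active, out)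
def pvStepB (role : PySem.Dict String (Bool × Int))
    (st : List Int × Int × List Char) (ch : Char) : List Int × Int × List Char :=
  match role.get? (String.singleton ch) with
  | none => if st.2.1 == 0 then (st.1, st.2.1, st.2.2 ++ [ch]) else st
  | some (true, i) =>
      let a := if PySem.List.pyGetD st.1 i 0 == 0 then st.2.1 + 1 else st.2.1
      (PySem.List.pySetD st.1 i (PySem.List.pyGetD st.1 i 0 + 1), a, st.2.2)
  | some (false, i) =>
      if PySem.List.pyGetD st.1 i 0 > 0 then
        let d' := PySem.List.pySetD st.1 i (PySem.List.pyGetD st.1 i 0 - 1)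
        (d', (if PySem.List.pyGetD d' i 0 == 0 then st.2.1 - 1 else st.2.1), st.2.2)
      else if st.2.1 == 0 then (st.1, st.2.1, st.2.2 ++ [ch]) else st

def filter_nested_py_alt (text : String) (pairs : List (String × String)) : String :=
  let role := pvRoleB pairs
  let res := text.toList.foldl (pvStepB role)
    (List.replicate pairs.length (0 : Int), (0 : Int), ([] : List Char))
  String.ofList res.2.2

-- ===== PRECONDITION & SPEC =====
def Spec_filter_nested_py (text : String) (pairs : List (String × String)) (out : String) : Prop := out = filter_nested_py_alt text pairs
instance (text : String) (pairs : List (String × String)) (out : String) : Decidable (Spec_filter_nested_py text pairs out) := by unfold Spec_filter_nested_py; infer_instance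

-- ===== CLAIM (what is proved, stated in full; the proofs are below) =====
def Claim_equal_filter_nested_py : Prop := ∀ (text : String) (pairs : List (String × String)), Dom_filter_nested_py text pairs → Spec_filter_nested_py text pairs (filter_nested_py text pairs)

-- ===== LEMMAS AND PROOFS =====

-- a left-biased choice (Python dict lookup through shadowing inserts)
def pvOr {α : Type} : Option α → Option α → Option α
  | some a, _ => some a
  | none, b => b

-- lookup in a fold of inserts over d0 = lookup over empty, else lookup in d0
theorem pv_get?_foldl_insert {α κ ν : Type} [BEq κ] [LawfulBEq κ]
    [DecidableEq κ] (l : List α) (k : α → κ) (v : α → ν) (d0 : PySem.Dict κ ν) (s : κ) :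
    (l.foldl (fun d x => d.insert (k x) (v x)) d0).get? s
      = pvOr ((l.foldl (fun d x => d.insert (k x) (v x)) PySem.Dict.empty).get? s) (d0.get? s) := by
  induction l using List.reverseRecOn with
  | nil => simp [pvOr, PySem.Dict.get?_empty]
  | append_singleton l x ih =>
      simp only [List.foldl_append, List.foldl_cons, List.foldl_nil, PySem.Dict.get?_insert, ih]
      by_cases hs : s = k x <;> simp [hs, pvOr]

-- lookup in a fold of inserts with mapped values
theorem pv_get?_foldl_insert_map {α κ ν ν' : Type} [BEq κ] [LawfulBEq κ]
    [DecidableEq κ] (l : List α) (k : α → κ) (v : α → ν) (g : ν → ν') (s : κ) :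
    (l.foldl (fun d x => d.insert (k x) (g (v x))) PySem.Dict.empty).get? s
      = ((l.foldl (fun d x => d.insert (k x) (v x)) PySem.Dict.empty).get? s).map g := by
  induction l using List.reverseRecOn with
  | nil => simp [PySem.Dict.get?_empty]
  | append_singleton l x ih =>
      simp only [List.foldl_append, List.foldl_cons, List.foldl_nil, PySem.Dict.get?_insert, ih]
      by_cases hs : s = k x <;> simp [hs]

-- every value of such a fold-built dict comes from the list
theorem pv_get?_foldl_insert_val {α κ ν : Type} [BEq κ] [LawfulBEq κ]
    [DecidableEq κ] (l : List α) (k : α → κ) (v : α → ν) (s : κ) (w : ν)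
    (h : (l.foldl (fun d x => d.insert (k x) (v x)) PySem.Dict.empty).get? s = some w) :
    ∃ x ∈ l, w = v x := by
  induction l using List.reverseRecOn with
  | nil => simp [PySem.Dict.get?_empty] at h
  | append_singleton l x ih =>
      rw [List.foldl_append, List.foldl_cons, List.foldl_nil, PySem.Dict.get?_insert] at h
      by_cases hs : s = k x
      · refine ⟨x, by simp, ?_⟩
        simp [hs] at h
        exact h.symm
      · rw [if_neg hs] at h
        obtain ⟨y, hy, hw⟩ := ih h
        exact ⟨y, by simp [hy], hw⟩

-- B's role lookup = A's two-stage lookup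
theorem pv_role_lookup (pairs : List (String × String)) (s : String) :
    (pvRoleB pairs).get? s
      = pvOr (((pvOpenersA pairs).get? s).map (fun i => (true, i)))
             (((pvClosersA pairs).get? s).map (fun i => (false, i))) := by
  unfold pvRoleB pvOpenersA pvClosersA
  rw [pv_get?_foldl_insert (PySem.List.enumerate pairs) (fun ip => ip.2.1) (fun ip => (true, ip.1)) _ s,
      pv_get?_foldl_insert_map (PySem.List.enumerate pairs) (fun ip => ip.2.1) (fun ip => ip.1)
        (fun i => (true, i)) s,
      pv_get?_foldl_insert_map (PySem.List.enumerate pairs) (fun ip => ip.2.2) (fun ip => ip.1)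
        (fun i => (false, i)) s]

-- any index stored in A's dicts is in [0, pairs.length)
theorem pv_openers_bound (pairs : List (String × String)) (s : String) (i : Int)
    (h : (pvOpenersA pairs).get? s = some i) : 0 ≤ i ∧ i < pairs.length := by
  unfold pvOpenersA at h
  obtain ⟨x, hx, rfl⟩ := pv_get?_foldl_insert_val _ _ _ _ _ h
  have hm : x.1 ∈ (PySem.List.enumerate pairs).map (fun y => y.1) := List.mem_map_of_mem hx
  rw [PySem.List.map_fst_enumerate] at hm
  have := PySem.List.mem_pyRange_one.1 hm
  omega

theorem pv_closers_bound (pairs : List (String × String)) (s : String) (i : Int)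
    (h : (pvClosersA pairs).get? s = some i) : 0 ≤ i ∧ i < pairs.length := by
  unfold pvClosersA at h
  obtain ⟨x, hx, rfl⟩ := pv_get?_foldl_insert_val _ _ _ _ _ h
  have hm : x.1 ∈ (PySem.List.enumerate pairs).map (fun y => y.1) := List.mem_map_of_mem hx
  rw [PySem.List.map_fst_enumerate] at hm
  have := PySem.List.mem_pyRange_one.1 hm
  omega

-- the number of nonzero depths, as B's 'active' counter tracks it
def pvNz (d : List Int) : Int := (d.countP (fun x => !(x == 0)) : Int)

theorem pv_countP_set {α : Type} (p : α → Bool) (l : List α) (i : Nat) (v : α) (h : i < l.length) :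
    (l.set i v).countP p + (if p l[i] then 1 else 0) = l.countP p + (if p v then 1 else 0) := by
  induction l generalizing i with
  | nil => simp at h
  | cons a t ih =>
      cases i with
      | zero =>
          simp only [List.set_cons_zero, List.countP_cons, List.getElem_cons_zero]
          split_ifs <;> omega
      | succ n =>
          have hn : n < t.length := by simpa using h
          simp only [List.set_cons_succ, List.countP_cons, List.getElem_cons_succ]
          have := ih n hn
          split_ifs at this ⊢ <;> omega

-- A's per-character rescan 'all(d == 0)' agrees with B's counter test 'active == 0'
theorem pv_all_nz (dep : List Int) : (dep.all (fun d => d == 0)) = (pvNz dep == 0) := by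
  by_cases h : ∀ x ∈ dep, x = 0
  · have h2 : dep.countP (fun x => !(x == 0)) = 0 := by
      rw [List.countP_eq_zero]; intro a ha; simp [h a ha]
    simp only [pvNz, h2, Int.natCast_zero, beq_self_eq_true, List.all_eq_true]
    intro x hx; simp [h x hx]
  · obtain ⟨x, hx, hx0⟩ : ∃ x ∈ dep, ¬x = 0 := by simpa using h
    have h1 : dep.all (fun d => d == 0) = false := List.all_eq_false.2 ⟨x, hx, by simp [hx0]⟩
    have h2 : 0 < dep.countP (fun x => !(x == 0)) := List.countP_pos_iff.2 ⟨x, hx, by simp [hx0]⟩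
    have h3 : (pvNz dep == 0) = false := by
      simp only [pvNz, beq_eq_false_iff_ne, ne_eq, Int.natCast_eq_zero]
      omega
    rw [h1, h3]

-- how the nonzero-count changes when one nonnegative depth is incremented
theorem pv_nz_incr (dep : List Int) (n : Nat) (hn : n < dep.length) (hpos : 0 ≤ dep[n]) :
    pvNz (dep.set n (dep[n] + 1)) = if dep[n] == 0 then pvNz dep + 1 else pvNz dep := by
  have hc := pv_countP_set (fun x => !(x == 0)) dep n (dep[n] + 1) hn
  have hv : (!(dep[n] + 1 == 0)) = true := by simp; omega
  rw [hv, if_pos rfl] at hc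
  by_cases h0 : dep[n] = 0
  · rw [h0] at hc; simp at hc
    simp only [pvNz, h0]; simp; omega
  · have : (!(dep[n] == 0)) = true := by simp [h0]
    rw [this, if_pos rfl] at hc
    simp only [pvNz]
    have h0' : (dep[n] == 0) = false := by simp [h0]
    rw [h0']; simp; omega

-- how the nonzero-count changes when one positive depth is decremented
theorem pv_nz_decr (dep : List Int) (n : Nat) (hn : n < dep.length) (hpos : 0 < dep[n]) :
    pvNz (dep.set n (dep[n] - 1)) = if dep[n] - 1 == 0 then pvNz dep - 1 else pvNz dep := by
  have hc := pv_countP_set (fun x => !(x == 0)) dep n (dep[n] - 1) hn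
  have hg : (!(dep[n] == 0)) = true := by simp; omega
  rw [hg, if_pos rfl] at hc
  by_cases h0 : dep[n] - 1 = 0
  · have : (!(dep[n] - 1 == 0)) = false := by simp [h0]
    rw [this, if_neg (by simp)] at hc
    simp only [pvNz]
    have : (dep[n] - 1 == 0) = true := by simp [h0]
    rw [this]; simp; omega
  · have : (!(dep[n] - 1 == 0)) = true := by simp [h0]
    rw [this, if_pos rfl] at hc
    simp only [pvNz]
    have : (dep[n] - 1 == 0) = false := by simp [h0]
    rw [this]; simp; omega

-- one step: B's state stays (A.depths, nz A.depths, A.out), and A's depths stay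
-- a nonnegative list of the right length
theorem pv_step (pairs : List (String × String)) (ch : Char) (dep : List Int) (out : List Char)
    (hlen : dep.length = pairs.length) (hnn : ∀ x ∈ dep, 0 ≤ x) :
    pvStepB (pvRoleB pairs) (dep, pvNz dep, out) ch
      = ((pvStepA (pvOpenersA pairs) (pvClosersA pairs) (dep, out) ch).1,
         pvNz (pvStepA (pvOpenersA pairs) (pvClosersA pairs) (dep, out) ch).1,
         (pvStepA (pvOpenersA pairs) (pvClosersA pairs) (dep, out) ch).2) ∧
    (pvStepA (pvOpenersA pairs) (pvClosersA pairs) (dep, out) ch).1.length = pairs.length ∧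
    (∀ x ∈ (pvStepA (pvOpenersA pairs) (pvClosersA pairs) (dep, out) ch).1, 0 ≤ x) := by
  have hro := pv_role_lookup pairs (String.singleton ch)
  rcases ho : (pvOpenersA pairs).get? (String.singleton ch) with _ | i
  · rcases hc : (pvClosersA pairs).get? (String.singleton ch) with _ | i
    · -- neither an opener nor a closer
      rw [ho, hc] at hro
      simp only [Option.map_none] at hro
      unfold pvStepA pvStepB
      simp only [hro, pvOr, PySem.Dict.contains_eq_isSome_get?, ho, hc, Option.isSome_none,
        Bool.false_eq_true, if_false, pv_all_nz]
      by_cases hz : (pvNz dep == 0) = true <;>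
        exact ⟨by simp [hz], by simp [hz, hlen], by simpa [hz] using hnn⟩
    · -- an unmatched-closer candidate
      rw [ho, hc] at hro
      simp only [Option.map_none, Option.map_some] at hro
      obtain ⟨h0, h1⟩ := pv_closers_bound pairs _ i hc
      have hn : i.toNat < dep.length := by omega
      have hget : PySem.List.pyGetD dep i 0 = dep[i.toNat] :=
        PySem.List.pyGetD_eq_getElem dep 0 h0 (by omega)
      unfold pvStepA pvStepB
      simp only [hro, pvOr, PySem.Dict.contains_eq_isSome_get?, ho, hc, Option.isSome_none,
        Option.isSome_some, Bool.false_eq_true, if_false, if_true,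
        PySem.Dict.getD_eq_get?_getD, Option.getD_some, hget,
        PySem.List.pySetD_of_nonneg dep _ h0, pv_all_nz]
      by_cases hpos : dep[i.toNat] > 0
      · have hget2 : PySem.List.pyGetD (dep.set i.toNat (dep[i.toNat] - 1)) i 0
            = dep[i.toNat] - 1 := by
          rw [PySem.List.pyGetD_eq_getElem _ 0 h0 (by simp; omega)]
          simp [List.getElem_set_self]
        simp only [hpos, if_true, hget2, pv_nz_decr dep i.toNat hn hpos]
        refine ⟨?_, by simp [hlen], ?_⟩
        · trivial
        · intro x hx
          rcases List.mem_or_eq_of_mem_set hx with hx | rfl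
          · exact hnn x hx
          · omega
      · simp only [hpos, if_false]
        by_cases hz : (pvNz dep == 0) = true <;>
          exact ⟨by simp [hz], by simp [hz, hlen], by simpa [hz] using hnn⟩
  · -- an opener
    rw [ho] at hro
    simp only [Option.map_some] at hro
    obtain ⟨h0, h1⟩ := pv_openers_bound pairs _ i ho
    have hn : i.toNat < dep.length := by omega
    have hget : PySem.List.pyGetD dep i 0 = dep[i.toNat] :=
      PySem.List.pyGetD_eq_getElem dep 0 h0 (by omega)
    have hx0 : 0 ≤ dep[i.toNat] := hnn _ (List.getElem_mem _)
    unfold pvStepA pvStepB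
    simp only [hro, pvOr, PySem.Dict.contains_eq_isSome_get?, ho, Option.isSome_some, if_true,
      PySem.Dict.getD_eq_get?_getD, Option.getD_some, hget,
      PySem.List.pySetD_of_nonneg dep _ h0, pv_nz_incr dep i.toNat hn hx0]
    refine ⟨?_, by simp [hlen], ?_⟩
    · trivial
    · intro x hx
      rcases List.mem_or_eq_of_mem_set hx with hx | rfl
      · exact hnn x hx
      · omega

theorem pv_loop (pairs : List (String × String)) (cs : List Char) (dep : List Int) (out : List Char)
    (hlen : dep.length = pairs.length) (hnn : ∀ x ∈ dep, 0 ≤ x) :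
    cs.foldl (pvStepB (pvRoleB pairs)) (dep, pvNz dep, out)
      = ((cs.foldl (pvStepA (pvOpenersA pairs) (pvClosersA pairs)) (dep, out)).1,
         pvNz (cs.foldl (pvStepA (pvOpenersA pairs) (pvClosersA pairs)) (dep, out)).1,
         (cs.foldl (pvStepA (pvOpenersA pairs) (pvClosersA pairs)) (dep, out)).2) := by
  induction cs generalizing dep out with
  | nil => rfl
  | cons c cs ih =>
      obtain ⟨hstep, hl, hn⟩ := pv_step pairs c dep out hlen hnn
      simp only [List.foldl_cons, hstep]
      exact ih _ _ hl hn

-- ===== VERDICT (by name: the statement is the Claim_ definition above) =====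
theorem filter_nested_py_spec : Claim_equal_filter_nested_py := by
  intro text pairs _
  unfold Spec_filter_nested_py filter_nested_py filter_nested_py_alt
  by_cases h : text = ""
  · subst h; rfl
  · simp only [h, ite_false]
    have hl := pv_loop pairs text.toList (List.replicate pairs.length (0 : Int)) []
      (by simp) (by simp)
    have h0 : pvNz (List.replicate pairs.length (0 : Int)) = 0 := by
      simp [pvNz, List.countP_eq_zero]
    rw [h0] at hl
    rw [hl]
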